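-- pv_equiv track=rewrite | github.com/BTanuj07/Smart-Web-Application-Replay-Generator | ml/behavioral_analyzer.py | _is_parameter_enumeration
-- ===== SOURCE A (Python) =====
-- from typing import Dict, List, Any, Tuple
--
-- def _is_parameter_enumeration(param_patterns: List[str]) -> bool:
--     """Check if parameter patterns indicate enumeration."""
--     if len(param_patterns) < 3:
--         return False
--
--     # Check for single character enumeration (a, b, c)
--     single_char_values = []
--     for pattern in param_patterns:
--         if '=' in pattern:
--             value = pattern.split('=')[-1]
--             if len(value) == 1 and value.isalpha():
--                 single_char_values.append(value)
--
--     if len(single_char_values) >= 3: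
--         # Check if they're sequential
--         sorted_chars = sorted(single_char_values)
--         sequential = all(ord(sorted_chars[i+1]) == ord(sorted_chars[i]) + 1
--                        for i in range(len(sorted_chars)-1))
--         if sequential:
--             return True
--
--     # Check for numeric enumeration
--     numeric_values = []
--     for pattern in param_patterns:
--         if '=' in pattern:
--             value = pattern.split('=')[-1]
--             if value.isdigit():
--                 numeric_values.append(int(value))
--
--     if len(numeric_values) >= 3:
--         sorted_nums = sorted(numeric_values)
--         sequential = all(sorted_nums[i+1] == sorted_nums[i] + 1
--                        for i in range(len(sorted_nums)-1))
--         if sequential: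
--             return True
--
--     return False
-- ===== SOURCE B (Python) =====
-- def _sequential(vals):
--     # order-free sequentiality test: all distinct and the span equals count-1
--     return len(set(vals)) == len(vals) and max(vals) - min(vals) == len(vals) - 1
--
--
-- def _is_parameter_enumeration(param_patterns):
--     """Check if parameter patterns indicate enumeration."""
--     if len(param_patterns) < 3:
--         return False
--
--     def tail(p):
--         return p.split('=')[-1]
--
--     chars = [ord(tail(p)) for p in param_patterns
--              if '=' in p and len(tail(p)) == 1 and tail(p).isalpha()]
--     if len(chars) >= 3 and _sequential(chars):
--         return True
--
--     nums = [int(tail(p)) for p in param_patterns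
--             if '=' in p and tail(p).isdigit()]
--     return len(nums) >= 3 and _sequential(nums)
-- ===== Notes on version B (the rewrite author's own statement) =====
-- stated objective: simpler
-- what changed: Replaces each 'sort, then check every consecutive difference is 1' block with an order-free closed test (all values distinct and max-min = count-1), collects the values by comprehensions instead of accumulator loops, and returns early from the char block.
import Mathlib
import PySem

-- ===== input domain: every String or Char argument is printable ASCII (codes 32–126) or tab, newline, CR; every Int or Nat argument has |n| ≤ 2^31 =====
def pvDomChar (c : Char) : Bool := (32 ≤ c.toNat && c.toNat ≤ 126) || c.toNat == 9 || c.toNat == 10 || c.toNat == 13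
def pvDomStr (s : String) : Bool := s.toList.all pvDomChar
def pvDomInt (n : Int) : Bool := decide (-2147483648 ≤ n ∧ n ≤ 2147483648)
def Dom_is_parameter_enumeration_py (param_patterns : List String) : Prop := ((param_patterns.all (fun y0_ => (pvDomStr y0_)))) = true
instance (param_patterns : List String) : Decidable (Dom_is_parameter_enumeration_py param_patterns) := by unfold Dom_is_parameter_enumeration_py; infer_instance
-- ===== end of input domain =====

-- B replaces each 'sort then check consecutive differences' block by an order-free
-- distinct-values + span test and collects the values with comprehensions; objective: simpler.

-- ord(value): Python's ord of a string guarded to have length 1 (exact under that guard;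
-- the 0 branch is never reached by either port).
def pvOrdStr (s : String) : Int :=
  match s.toList with
  | c :: _ => (c.toNat : Int)
  | [] => 0

-- ===== PORT A =====
-- Exactness notes: `pattern.split('=')` with a non-empty separator never raises and yields a
-- non-empty list (split? is never none, [-1] is pyGetD with a dummy default).  A sorts the
-- collected single-character strings and compares ord of neighbours; length-1 strings compare
-- exactly by their code point, so the port stores ord(value) at collection time and sorts the
-- integers — the same order and the same neighbour comparisons.  int(value) under the isdigit
-- guard is (ofStr? value).getD 0 (never none there).
def is_parameter_enumeration_py (param_patterns : List String) : Bool :=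
  if PySem.List.len param_patterns < 3 then false
  else
    let single_char_values : List Int := param_patterns.foldl (fun acc pattern =>
      if PySem.Str.isIn "=" pattern then
        let value := PySem.List.pyGetD ((PySem.Str.split? pattern "=").getD []) (-1) ""
        if PySem.Str.len value == 1 && PySem.Str.strIsalpha value then
          acc ++ [pvOrdStr value]
        else acc
      else acc) []
    let charSeq : Bool :=
      if 3 ≤ PySem.List.len single_char_values then
        let sorted_chars := PySem.List.sorted single_char_values (fun x => x) false
        (PySem.List.pyRange 0 (PySem.List.len sorted_chars - 1) 1).all
          (fun i => PySem.List.pyGetD sorted_chars (i + 1) 0 == PySem.List.pyGetD sorted_chars i 0 + 1)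
      else false
    if charSeq then true
    else
      let numeric_values : List Int := param_patterns.foldl (fun acc pattern =>
        if PySem.Str.isIn "=" pattern then
          let value := PySem.List.pyGetD ((PySem.Str.split? pattern "=").getD []) (-1) ""
          if PySem.Str.strIsdigit value then
            acc ++ [(PySem.Int.ofStr? value).getD 0]
          else acc
        else acc) []
      if 3 ≤ PySem.List.len numeric_values then
        let sorted_nums := PySem.List.sorted numeric_values (fun x => x) false
        (PySem.List.pyRange 0 (PySem.List.len sorted_nums - 1) 1).all
          (fun i => PySem.List.pyGetD sorted_nums (i + 1) 0 == PySem.List.pyGetD sorted_nums i 0 + 1)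
      else false

-- ===== PORT B =====
-- p.split('=')[-1] (Source B's helper `tail`; split with a non-empty separator never raises)
def pvTail (p : String) : String :=
  PySem.List.pyGetD ((PySem.Str.split? p "=").getD []) (-1) ""

-- Source B's `_sequential`: all values distinct and max-min spans exactly the count
-- (only ever called on lists of length ≥ 3, where max/min exist; getD 0 is unreachable).
def pvSequential (vals : List Int) : Bool :=
  PySem.Set.len (PySem.Set.ofList vals) == PySem.List.len vals &&
  ((PySem.List.max? vals (fun x => x)).getD 0 - (PySem.List.min? vals (fun x => x)).getD 0
     == PySem.List.len vals - 1)

def is_parameter_enumeration_py_alt (param_patterns : List String) : Bool :=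
  if PySem.List.len param_patterns < 3 then false
  else
    let chars : List Int :=
      (param_patterns.filter (fun p =>
        PySem.Str.isIn "=" p && PySem.Str.len (pvTail p) == 1 && PySem.Str.strIsalpha (pvTail p))).map
        (fun p => pvOrdStr (pvTail p))
    if decide (3 ≤ PySem.List.len chars) && pvSequential chars then true
    else
      let nums : List Int :=
        (param_patterns.filter (fun p =>
          PySem.Str.isIn "=" p && PySem.Str.strIsdigit (pvTail p))).map
          (fun p => (PySem.Int.ofStr? (pvTail p)).getD 0)
      decide (3 ≤ PySem.List.len nums) && pvSequential nums

-- ===== PRECONDITION & SPEC =====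
def Spec_is_parameter_enumeration_py (param_patterns : List String) (out : Bool) : Prop := out = is_parameter_enumeration_py_alt param_patterns
instance (param_patterns : List String) (out : Bool) : Decidable (Spec_is_parameter_enumeration_py param_patterns out) := by unfold Spec_is_parameter_enumeration_py; infer_instance

-- ===== CLAIM (what is proved, stated in full; the proofs are below) =====
def Claim_equal_is_parameter_enumeration_py : Prop := ∀ (param_patterns : List String), Dom_is_parameter_enumeration_py param_patterns → Spec_is_parameter_enumeration_py param_patterns (is_parameter_enumeration_py param_patterns)

-- ===== LEMMAS AND PROOFS =====

-- A's accumulator loop with its nested guards collects exactly B's filter-then-map.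
lemma pv_collect_eq (pp : List String) (c1 c2 : String → Bool) (f : String → Int) :
    pp.foldl (fun acc p => if c1 p then (if c2 p then acc ++ [f p] else acc) else acc)
      ([] : List Int) = (pp.filter (fun p => c1 p && c2 p)).map f := by
  have h : (fun (acc : List Int) p => if c1 p then (if c2 p then acc ++ [f p] else acc) else acc)
      = fun acc p => if (c1 p && c2 p) then acc ++ [f p] else acc := by
    funext acc p
    by_cases h1 : c1 p <;> by_cases h2 : c2 p <;> simp [h1, h2]
  rw [h, PySem.List.foldl_append_if]
  simp

lemma pv_ofList_sublist (l : List Int) : List.Sublist (PySem.Set.ofList l : List Int) l := by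
  induction l with
  | nil => simp [PySem.Set.ofList]
  | cons x xs ih =>
    rw [PySem.Set.ofList_cons]
    have hdis : List.Sublist ((PySem.Set.ofList xs).discard x) (PySem.Set.ofList xs) := by
      simp only [PySem.Set.discard]
      exact List.filter_sublist
    exact List.Sublist.cons₂ x (hdis.trans ih)

lemma pv_ofList_len_iff (l : List Int) :
    PySem.Set.len (PySem.Set.ofList l) = PySem.List.len l ↔ l.Nodup := by
  constructor
  · intro h
    have hlen : (PySem.Set.ofList l : List Int).length = l.length := by
      simpa [PySem.Set.len, PySem.List.len_eq] using h
    have := (pv_ofList_sublist l).eq_of_length hlen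
    rw [← this]
    exact PySem.Set.nodup_ofList l
  · intro h
    rw [PySem.Set.ofList_eq_self_of_nodup l h]
    simp [PySem.Set.len, PySem.List.len_eq]

-- the last element of a ≤-sorted list bounds every element
lemma pv_getLast_max (s : List Int) :
    ∀ M, s.getLast? = some M → s.Pairwise (· ≤ ·) → ∀ y ∈ s, y ≤ M := by
  induction s with
  | nil => intro M hM hpw y hy; simp at hy
  | cons a t ih =>
    intro M hM hpw y hy
    cases t with
    | nil => simp at hM hy; omega
    | cons b u =>
      rw [List.getLast?_cons_cons] at hM
      have hMmem : M ∈ (b :: u) := List.mem_of_getLast? hM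
      rcases List.mem_cons.mp hy with rfl | hy'
      · exact (List.pairwise_cons.mp hpw).1 M hMmem
      · exact ih M hM (List.pairwise_cons.mp hpw).2 y hy'

-- chains of exact successors: span and strictness
lemma pv_chain_getLast (a : Int) (t : List Int)
    (h : (a :: t).IsChain (fun x y => y = x + 1)) :
    (a :: t).getLast? = some (a + t.length) := by
  induction t generalizing a with
  | nil => simp
  | cons b u ih =>
    rw [List.isChain_cons_cons] at h
    rw [List.getLast?_cons_cons, ih b h.2, h.1]
    simp only [List.length_cons, Option.some.injEq]
    push_cast
    ring

lemma pv_strict_ge (a : Int) (t : List Int) (h : (a :: t).IsChain (· < ·)) :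
    ∀ M, (a :: t).getLast? = some M → a + t.length ≤ M := by
  induction t generalizing a with
  | nil => intro M hM; simp at hM ⊢; omega
  | cons b u ih =>
    intro M hM
    rw [List.isChain_cons_cons] at h
    rw [List.getLast?_cons_cons] at hM
    have h1 := ih b h.2 M hM
    have hab : a < b := h.1
    simp only [List.length_cons] at h1 ⊢
    push_cast at h1 ⊢
    omega

lemma pv_chain_of_span (a : Int) (t : List Int) (h : (a :: t).IsChain (· < ·))
    (hspan : (a :: t).getLast? = some (a + t.length)) :
    (a :: t).IsChain (fun x y => y = x + 1) := by
  induction t generalizing a with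
  | nil => simp
  | cons b u ih =>
    rw [List.isChain_cons_cons] at h
    rw [List.getLast?_cons_cons] at hspan
    obtain ⟨M, hM⟩ : ∃ M, (b :: u).getLast? = some M := ⟨_, hspan⟩
    have hge := pv_strict_ge b u h.2 M hM
    have hMv : M = a + ((u.length : Int) + 1 + 1) - 1 := by
      have := hM.symm.trans hspan
      simp only [Option.some.injEq, List.length_cons] at this
      push_cast at this
      omega
    have hab : a < b := h.1
    have hb : b = a + 1 := by omega
    rw [List.isChain_cons_cons]
    refine ⟨hb, ih b h.2 ?_⟩
    rw [hM]
    simp only [Option.some.injEq]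
    omega

-- A's scan over the sorted list, read as a chain statement
lemma pv_all_iff_chain (s : List Int) :
    ((PySem.List.pyRange 0 (PySem.List.len s - 1) 1).all
      (fun i => PySem.List.pyGetD s (i + 1) 0 == PySem.List.pyGetD s i 0 + 1)) = true
    ↔ s.IsChain (fun a b => b = a + 1) := by
  rw [List.all_eq_true, List.isChain_iff_getElem]
  constructor
  · intro h i hi
    have hmem : ((i : Nat) : Int) ∈ PySem.List.pyRange 0 (PySem.List.len s - 1) 1 := by
      rw [PySem.List.mem_pyRange_one, PySem.List.len_eq]
      refine ⟨by positivity, by omega⟩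
    have hp := h _ hmem
    rw [beq_iff_eq] at hp
    have e1 : ((i : Nat) : Int) + 1 = ((i + 1 : Nat) : Int) := by omega
    rw [e1, PySem.List.pyGetD_natCast, PySem.List.pyGetD_natCast,
        List.getD_eq_getElem _ _ hi, List.getD_eq_getElem _ _ (by omega)] at hp
    exact hp
  · intro h x hx
    rw [PySem.List.mem_pyRange_one, PySem.List.len_eq] at hx
    have hxe : x = ((x.toNat : Nat) : Int) := by omega
    rw [beq_iff_eq, hxe]
    have e1 : ((x.toNat : Nat) : Int) + 1 = ((x.toNat + 1 : Nat) : Int) := by omega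
    have hb : x.toNat + 1 < s.length := by omega
    rw [e1, PySem.List.pyGetD_natCast, PySem.List.pyGetD_natCast,
        List.getD_eq_getElem _ _ hb, List.getD_eq_getElem _ _ (by omega)]
    exact h x.toNat hb

-- the heart: on a non-empty list, A's sort-and-scan test equals B's distinct+span test
lemma pv_seq_eq (l : List Int) (hne : l ≠ []) :
    ((PySem.List.pyRange 0 (PySem.List.len (PySem.List.sorted l (fun x => x) false) - 1) 1).all
      (fun i => PySem.List.pyGetD (PySem.List.sorted l (fun x => x) false) (i + 1) 0
        == PySem.List.pyGetD (PySem.List.sorted l (fun x => x) false) i 0 + 1))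
    = pvSequential l := by
  have hperm : (PySem.List.sorted l (fun x => x) false).Perm l := PySem.List.sorted_perm l _ false
  have hpw : (PySem.List.sorted l (fun x => x) false).Pairwise (· ≤ ·) :=
    PySem.List.sorted_pairwise l (fun x : Int => x)
  obtain ⟨m0, t, hst⟩ : ∃ m0 t, PySem.List.sorted l (fun x => x) false = m0 :: t := by
    cases hcase : PySem.List.sorted l (fun x => x) false with
    | nil => exact absurd ((PySem.List.sorted_eq_nil_iff l _ false).mp hcase) hne
    | cons a t => exact ⟨a, t, rfl⟩
  rw [hst] at hperm hpw ⊢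
  have hlen : t.length + 1 = l.length := by simpa using hperm.length_eq
  obtain ⟨M0, hM0⟩ : ∃ M0, (m0 :: t).getLast? = some M0 := by
    cases hg : (m0 :: t).getLast? with
    | none => simp [List.getLast?_eq_none_iff] at hg
    | some M => exact ⟨M, rfl⟩
  obtain ⟨m, hm⟩ : ∃ m, PySem.List.min? l (fun x => x) = some m := by
    cases hmin : PySem.List.min? l (fun x => x) with
    | none => exact absurd ((PySem.List.min?_eq_none_iff l _).mp hmin) hne
    | some m => exact ⟨m, rfl⟩
  obtain ⟨M, hM⟩ : ∃ M, PySem.List.max? l (fun x => x) = some M := by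
    cases hmax : PySem.List.max? l (fun x => x) with
    | none => exact absurd ((PySem.List.max?_eq_none_iff l _).mp hmax) hne
    | some M => exact ⟨M, rfl⟩
  have hmv : m = m0 := by
    have h1 : ∀ y ∈ l, m ≤ y := fun y hy => by simpa using PySem.List.min?_isMin hm y hy
    have h2 := PySem.List.key_head_sorted_le l (fun x : Int => x) hst
    have hm0l : m0 ∈ l := hperm.mem_iff.mp (by simp)
    exact le_antisymm (h1 m0 hm0l) (by simpa using h2 m (PySem.List.min?_mem hm))
  have hMv : M = M0 := by
    have h1 : ∀ y ∈ l, y ≤ M := fun y hy => by simpa using PySem.List.max?_isMax hM y hy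
    have h2 := pv_getLast_max (m0 :: t) M0 hM0 hpw
    have hM0l : M0 ∈ l := hperm.mem_iff.mp (List.mem_of_getLast? hM0)
    have hMs : M ∈ (m0 :: t) := hperm.mem_iff.mpr (PySem.List.max?_mem hM)
    exact le_antisymm (h2 M hMs) (h1 M0 hM0l)
  have hR : pvSequential l = true ↔ (l.Nodup ∧ M0 - m0 = (l.length : Int) - 1) := by
    unfold pvSequential
    rw [Bool.and_eq_true, beq_iff_eq, beq_iff_eq, pv_ofList_len_iff, hm, hM]
    simp only [Option.getD_some, PySem.List.len_eq]
    rw [hmv, hMv]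
  rw [Bool.eq_iff_iff, pv_all_iff_chain, hR]
  constructor
  · intro h
    have hstrict : (m0 :: t).IsChain (· < ·) :=
      h.imp (fun hab => by omega)
    have hnods : (m0 :: t).Nodup :=
      (List.isChain_iff_pairwise.mp hstrict).imp (fun hab => ne_of_lt hab)
    refine ⟨hperm.nodup hnods, ?_⟩
    have hg := (hM0.symm.trans (pv_chain_getLast m0 t h))
    simp only [Option.some.injEq] at hg
    omega
  · rintro ⟨hnod, hspan⟩
    have hnods : (m0 :: t).Nodup := hperm.symm.nodup hnod
    have hstrictpw : (m0 :: t).Pairwise (· < ·) :=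
      (hpw.and hnods).imp (fun hab => lt_of_le_of_ne hab.1 hab.2)
    have hchain : (m0 :: t).IsChain (· < ·) := List.isChain_iff_pairwise.mpr hstrictpw
    apply pv_chain_of_span m0 t hchain
    rw [hM0]
    simp only [Option.some.injEq]
    omega

-- both tails, once the collected lists coincide
lemma pv_tail_eq (C N : List Int) :
    (if (if 3 ≤ PySem.List.len C then
          (PySem.List.pyRange 0 (PySem.List.len (PySem.List.sorted C (fun x => x) false) - 1) 1).all
            (fun i => PySem.List.pyGetD (PySem.List.sorted C (fun x => x) false) (i + 1) 0
              == PySem.List.pyGetD (PySem.List.sorted C (fun x => x) false) i 0 + 1)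
         else false) then true
     else
       (if 3 ≤ PySem.List.len N then
          (PySem.List.pyRange 0 (PySem.List.len (PySem.List.sorted N (fun x => x) false) - 1) 1).all
            (fun i => PySem.List.pyGetD (PySem.List.sorted N (fun x => x) false) (i + 1) 0
              == PySem.List.pyGetD (PySem.List.sorted N (fun x => x) false) i 0 + 1)
        else false))
    = (if decide (3 ≤ PySem.List.len C) && pvSequential C then true
       else decide (3 ≤ PySem.List.len N) && pvSequential N) := by
  have hne : ∀ (L : List Int), 3 ≤ PySem.List.len L → L ≠ [] := by
    intro L h3 h0
    rw [h0, PySem.List.len_eq] at h3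
    norm_num at h3
  by_cases h3 : 3 ≤ PySem.List.len C
  · rw [if_pos h3, pv_seq_eq C (hne C h3)]
    by_cases h3n : 3 ≤ PySem.List.len N
    · rw [if_pos h3n, pv_seq_eq N (hne N h3n), decide_eq_true h3, decide_eq_true h3n]
      cases hseq : pvSequential C <;> simp
    · rw [if_neg h3n, decide_eq_true h3, decide_eq_false h3n]
      cases hseq : pvSequential C <;> simp
  · rw [if_neg h3]
    by_cases h3n : 3 ≤ PySem.List.len N
    · rw [if_pos h3n, pv_seq_eq N (hne N h3n), decide_eq_false h3, decide_eq_true h3n]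
      simp
    · rw [if_neg h3n, decide_eq_false h3, decide_eq_false h3n]
      simp

-- ===== VERDICT (by name: the statement is the Claim_ definition above) =====
theorem is_parameter_enumeration_py_spec : Claim_equal_is_parameter_enumeration_py := by
  intro pp _
  unfold Spec_is_parameter_enumeration_py
  simp only [is_parameter_enumeration_py, is_parameter_enumeration_py_alt, pvTail]
  by_cases hlen : PySem.List.len pp < 3
  · rw [if_pos hlen, if_pos hlen]
  · rw [if_neg hlen, if_neg hlen]
    rw [pv_collect_eq pp
        (fun p => PySem.Str.isIn "=" p)
        (fun p => PySem.Str.len (PySem.List.pyGetD ((PySem.Str.split? p "=").getD []) (-1) "") == 1 &&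
          PySem.Str.strIsalpha (PySem.List.pyGetD ((PySem.Str.split? p "=").getD []) (-1) ""))
        (fun p => pvOrdStr (PySem.List.pyGetD ((PySem.Str.split? p "=").getD []) (-1) "")),
      pv_collect_eq pp
        (fun p => PySem.Str.isIn "=" p)
        (fun p => PySem.Str.strIsdigit (PySem.List.pyGetD ((PySem.Str.split? p "=").getD []) (-1) ""))
        (fun p => (PySem.Int.ofStr? (PySem.List.pyGetD ((PySem.Str.split? p "=").getD []) (-1) "")).getD 0)]
    rw [show (fun p => PySem.Str.isIn "=" p &&
          (PySem.Str.len (PySem.List.pyGetD ((PySem.Str.split? p "=").getD []) (-1) "") == 1 &&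
            PySem.Str.strIsalpha (PySem.List.pyGetD ((PySem.Str.split? p "=").getD []) (-1) "")))
        = (fun p => PySem.Str.isIn "=" p &&
            PySem.Str.len (PySem.List.pyGetD ((PySem.Str.split? p "=").getD []) (-1) "") == 1 &&
            PySem.Str.strIsalpha (PySem.List.pyGetD ((PySem.Str.split? p "=").getD []) (-1) ""))
      from funext fun p => (Bool.and_assoc _ _ _).symm]
    exact pv_tail_eq _ _
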